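-- pv_equiv track=rewrite | github.com/freedmand/semantra | models.py | get_text_chunks
-- ===== SOURCE A (Python) =====
-- def get_text_chunks(text: str, tokens) -> "list[str]":
--     offsets = tokens["offset_mapping"][0]
--     chunks = []
--     prev_i = None
--     prev_j = None
--     for i, j in offsets:
--         new_i = prev_j if i == j else i
--         if prev_i is not None:
--             chunks.append(text[prev_i:new_i])
--         if prev_i is None:
--             prev_i = 0
--         elif new_i > prev_i:
--             prev_i = new_i
--         if prev_j is None:
--             prev_j = j
--         elif j > prev_j:
--             prev_j = j
--     chunks.append(text[0 if prev_i is None else prev_i :])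
--     return chunks
-- ===== SOURCE B (Python) =====
-- def get_text_chunks(text: str, tokens) -> "list[str]":
--     offsets = tokens["offset_mapping"][0]
--     if not offsets:
--         return [text]
--     # pass 1: running maximum of the end offsets seen BEFORE each later position
--     pj = []
--     m = offsets[0][1]
--     for _, j in offsets[1:]:
--         pj.append(m)
--         if j > m:
--             m = j
--     # pass 2: resolved cut position for each offset after the first
--     cuts = [p if i == j else i for (i, j), p in zip(offsets[1:], pj)]
--     # pass 3: clamp the cuts into a non-decreasing list of slice starts
--     starts = [0]
--     for c in cuts:
--         starts.append(c if c > starts[-1] else starts[-1])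
--     # pass 4: slice the text between consecutive boundaries
--     return [text[a:c] for a, c in zip(starts, cuts)] + [text[starts[-1]:]]
-- ===== Notes on version B (the rewrite author's own statement) =====
-- stated objective: alternative
-- what changed: A is one stateful loop threading None-sentinel prev_i/prev_j and appending slices as it goes; B is a staged data-flow pipeline over intermediate lists: a prefix-maximum list of end offsets, a zip comprehension resolving cut positions, a clamp scan turning cuts into non-decreasing slice starts, and a final zip comprehension that does the slicing (empty offsets handled up front as [text]).
import Mathlib
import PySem

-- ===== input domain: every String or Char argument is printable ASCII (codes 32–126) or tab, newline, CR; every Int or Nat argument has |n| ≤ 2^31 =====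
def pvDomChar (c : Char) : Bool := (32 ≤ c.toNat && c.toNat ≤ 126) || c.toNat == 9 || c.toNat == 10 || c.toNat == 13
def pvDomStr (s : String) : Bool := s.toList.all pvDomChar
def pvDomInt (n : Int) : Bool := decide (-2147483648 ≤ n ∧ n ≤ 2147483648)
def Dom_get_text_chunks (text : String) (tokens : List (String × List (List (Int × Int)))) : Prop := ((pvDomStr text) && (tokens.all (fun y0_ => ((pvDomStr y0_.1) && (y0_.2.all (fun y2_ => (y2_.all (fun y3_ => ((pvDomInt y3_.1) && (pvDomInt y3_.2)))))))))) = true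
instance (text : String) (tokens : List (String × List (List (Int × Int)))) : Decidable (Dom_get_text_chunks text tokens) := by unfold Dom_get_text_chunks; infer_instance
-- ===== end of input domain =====

-- B replaces A's single stateful loop (None-sentinel prev_i/prev_j, appending slices as it
-- goes) by a staged data-flow pipeline: a prefix-maximum list of end offsets, a zip
-- comprehension resolving the cut positions, a clamp scan producing the slice starts, and a
-- final zip comprehension doing the slicing (objective: alternative decomposition; same cost).

-- ===== PORT A =====
-- one loop step of A: state (chunks, prev_i, prev_j)
def pvAStep (text : String) (s : List String × Option Int × Option Int) (p : Int × Int) :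
    List String × Option Int × Option Int :=
  let newI : Option Int := if p.1 == p.2 then s.2.2 else some p.1
  let chunks := match s.2.1 with
    | some pi => s.1 ++ [PySem.Str.slice text (some pi) newI]
    | none => s.1
  let prevI : Option Int := match s.2.1, newI with
    | none, _ => some 0
    | some pi, some ni => if ni > pi then some ni else some pi
    | some pi, none => some pi   -- unreachable in A (None > int would raise); kept for totality
  let prevJ : Option Int := match s.2.2 with
    | none => some p.2
    | some pj => if p.2 > pj then some p.2 else some pj
  (chunks, prevI, prevJ)

def get_text_chunks (text : String) (tokens : List (String × List (List (Int × Int)))) : List String :=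
  let offsets := PySem.List.pyGetD (((PySem.Dict.mk tokens).get? "offset_mapping").getD []) 0 []
  let st := offsets.foldl (pvAStep text) ([], none, none)
  st.1 ++ [PySem.Str.slice text (some (st.2.1.getD 0)) none]

-- ===== PORT B =====
def get_text_chunks_alt (text : String) (tokens : List (String × List (List (Int × Int)))) : List String :=
  let offsets := PySem.List.pyGetD (((PySem.Dict.mk tokens).get? "offset_mapping").getD []) 0 []
  match offsets with
  | [] => [text]
  | (_, j0) :: rest =>
    -- pass 1: running maximum of the end offsets seen before each later position
    let pj := (rest.foldl (fun (s : List Int × Int) (p : Int × Int) =>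
        (s.1 ++ [s.2], if p.2 > s.2 then p.2 else s.2)) ([], j0)).1
    -- pass 2: resolved cut position for each offset after the first
    let cuts := (rest.zip pj).map (fun x => if x.1.1 == x.1.2 then x.2 else x.1.1)
    -- pass 3: clamp the cuts into a non-decreasing list of slice starts
    let starts := cuts.foldl (fun (acc : List Int) c =>
        acc ++ [if c > acc.getLastD 0 then c else acc.getLastD 0]) [0]
    -- pass 4: slice the text between consecutive boundaries
    (starts.zip cuts).map (fun ac => PySem.Str.slice text (some ac.1) (some ac.2))
      ++ [PySem.Str.slice text (some (starts.getLastD 0)) none]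

-- ===== PRECONDITION & SPEC =====
-- A raises KeyError if "offset_mapping" is absent and IndexError on [0] if its value is empty.
def Pre_get_text_chunks (text : String) (tokens : List (String × List (List (Int × Int)))) : Prop :=
  (((PySem.Dict.mk tokens).get? "offset_mapping").getD []) ≠ []
instance (text : String) (tokens : List (String × List (List (Int × Int)))) : Decidable (Pre_get_text_chunks text tokens) := by unfold Pre_get_text_chunks; infer_instance

def pvWitness_get_text_chunks : String × (List (String × List (List (Int × Int)))) :=
  ("hello", [("offset_mapping", [[(0, 2), (2, 5)]])])

def Spec_get_text_chunks (text : String) (tokens : List (String × List (List (Int × Int)))) (out : List String) : Prop := out = get_text_chunks_alt text tokens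
instance (text : String) (tokens : List (String × List (List (Int × Int)))) (out : List String) : Decidable (Spec_get_text_chunks text tokens out) := by unfold Spec_get_text_chunks; infer_instance

-- ===== CLAIM (what is proved, stated in full; the proofs are below) =====
def Claim_equal_get_text_chunks : Prop := ∀ (text : String) (tokens : List (String × List (List (Int × Int)))), Dom_get_text_chunks text tokens → Pre_get_text_chunks text tokens → Spec_get_text_chunks text tokens (get_text_chunks text tokens)

-- ===== LEMMAS AND PROOFS =====

-- proof-only recursive characterisations of B's staged passes
def pvPJ (m : Int) : List (Int × Int) → List Int
  | [] => []
  | p :: r => m :: pvPJ (if p.2 > m then p.2 else m) r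

def pvCuts (m : Int) : List (Int × Int) → List Int
  | [] => []
  | p :: r => (if p.1 == p.2 then m else p.1) :: pvCuts (if p.2 > m then p.2 else m) r

def pvStarts (s : Int) : List Int → List Int
  | [] => []
  | c :: cs => (if c > s then c else s) :: pvStarts (if c > s then c else s) cs

def pvFinal (s : Int) : List Int → Int
  | [] => s
  | c :: cs => pvFinal (if c > s then c else s) cs

def pvMaxJ (m : Int) : List (Int × Int) → Int
  | [] => m
  | p :: r => pvMaxJ (if p.2 > m then p.2 else m) r

-- pass 1 of B computes pvPJ
theorem pv_pass1 (rest : List (Int × Int)) (acc : List Int) (m : Int) :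
    (rest.foldl (fun (s : List Int × Int) (p : Int × Int) =>
        (s.1 ++ [s.2], if p.2 > s.2 then p.2 else s.2)) (acc, m)).1 = acc ++ pvPJ m rest := by
  induction rest generalizing acc m with
  | nil => simp [pvPJ]
  | cons p r ih => simp [pvPJ, ih]

-- pass 2 of B computes pvCuts
theorem pv_pass2 (rest : List (Int × Int)) (m : Int) :
    (rest.zip (pvPJ m rest)).map (fun x => if x.1.1 == x.1.2 then x.2 else x.1.1)
      = pvCuts m rest := by
  induction rest generalizing m with
  | nil => simp [pvPJ, pvCuts]
  | cons p r ih => simp only [pvPJ, List.zip_cons_cons, List.map_cons, pvCuts, ih]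

-- pass 3 of B computes pvStarts
theorem pv_pass3 (cs : List Int) (acc : List Int) (s : Int) :
    cs.foldl (fun (acc : List Int) c =>
        acc ++ [if c > acc.getLastD 0 then c else acc.getLastD 0]) (acc ++ [s])
      = (acc ++ [s]) ++ pvStarts s cs := by
  induction cs generalizing acc s with
  | nil => simp [pvStarts]
  | cons c cs ih =>
    simp only [List.foldl_cons, pvStarts]
    rw [List.getLastD_concat]
    have := ih (acc ++ [s]) (if c > s then c else s)
    simpa using this

-- the last element of the starts list is pvFinal
theorem pv_last (cs : List Int) (s : Int) :
    (s :: pvStarts s cs).getLastD 0 = pvFinal s cs := by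
  induction cs generalizing s with
  | nil => simp [pvStarts, pvFinal]
  | cons c cs ih =>
    have h1 : (s :: pvStarts s (c :: cs)).getLastD 0
        = (pvStarts (if c > s then c else s) cs).getLastD (if c > s then c else s) := by
      rw [pvStarts, List.getLastD_cons, List.getLastD_cons]
    have h2 := ih (if c > s then c else s)
    rw [List.getLastD_cons] at h2
    rw [h1, pvFinal, ← h2]

-- A's loop, from a resolved state, equals B's staged pipeline
theorem pvAB (text : String) (rest : List (Int × Int)) (s m : Int) (acc : List String) :
    rest.foldl (pvAStep text) (acc, some s, some m)
      = (acc ++ ((s :: pvStarts s (pvCuts m rest)).zip (pvCuts m rest)).map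
            (fun ac => PySem.Str.slice text (some ac.1) (some ac.2)),
         some (pvFinal s (pvCuts m rest)), some (pvMaxJ m rest)) := by
  induction rest generalizing s m acc with
  | nil => simp [pvCuts, pvStarts, pvFinal, pvMaxJ]
  | cons p r ih =>
    have hcut : (if p.1 == p.2 then some m else some p.1)
        = some (if p.1 == p.2 then m else p.1) := by
      by_cases h : p.1 = p.2 <;> simp [h]
    have hsome : ∀ (a b : Int), (if a > b then some a else some b) = some (if a > b then a else b) :=
      fun a b => by split <;> rfl
    simp only [List.foldl_cons, pvAStep, hcut, hsome]
    rw [ih]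
    simp [pvCuts, pvStarts, pvFinal, pvMaxJ]

theorem pv_slice_zero (text : String) : PySem.Str.slice text (some 0) none = text := by
  simp [PySem.Str.slice]

-- ===== VERDICT (by name: the statement is the Claim_ definition above) =====
theorem get_text_chunks_spec : Claim_equal_get_text_chunks := by
  intro text tokens _ hpre
  unfold Spec_get_text_chunks get_text_chunks get_text_chunks_alt
  cases hoff : PySem.List.pyGetD (((PySem.Dict.mk tokens).get? "offset_mapping").getD []) 0 [] with
  | nil => simp [pv_slice_zero]
  | cons p rest =>
    obtain ⟨i0, j0⟩ := p
    have hfirst : pvAStep text ([], none, none) (i0, j0) = ([], some 0, some j0) := rfl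
    simp only [List.foldl_cons, hfirst, pvAB]
    rw [pv_pass1]
    simp only [List.nil_append]
    rw [pv_pass2]
    have h3 := pv_pass3 (pvCuts j0 rest) [] 0
    simp only [List.nil_append] at h3
    rw [h3]
    have : ([0] : List Int) ++ pvStarts 0 (pvCuts j0 rest) = 0 :: pvStarts 0 (pvCuts j0 rest) := rfl
    rw [this, pv_last]
    simp
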